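-- pv_equiv track=rewrite | github.com/alexyalcin/deco_analysis | crop_images.py | get_crop_coordinates
-- ===== SOURCE A (Python) =====
-- def get_crop_coordinates(corners):
--     y = set([])
--     x = set([])
--     for vertex in corners:
--         y.add(vertex[0])
--         x.add(vertex[1])
--     y = list(y)
--     x = list(x)
--     y.sort()
--     x.sort()
--     return y, x
-- ===== SOURCE B (Python) =====
-- def _dedup_sorted(lst):
--     out = []
--     prev = None
--     for v in lst:
--         if prev != v:
--             out.append(v)
--             prev = v
--     return out
--
--
-- def get_crop_coordinates(corners):
--     ys = []
--     xs = []
--     for vertex in corners: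
--         ys.append(vertex[0])
--         xs.append(vertex[1])
--     ys.sort()
--     xs.sort()
--     return _dedup_sorted(ys), _dedup_sorted(xs)
-- ===== Notes on version B (the rewrite author's own statement) =====
-- stated objective: alternative
-- what changed: Replaces hash-set collection followed by sorting the distinct elements with collecting plain coordinate lists, sorting them, and removing duplicates in a single adjacent-compare pass over each sorted list.
import Mathlib
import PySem

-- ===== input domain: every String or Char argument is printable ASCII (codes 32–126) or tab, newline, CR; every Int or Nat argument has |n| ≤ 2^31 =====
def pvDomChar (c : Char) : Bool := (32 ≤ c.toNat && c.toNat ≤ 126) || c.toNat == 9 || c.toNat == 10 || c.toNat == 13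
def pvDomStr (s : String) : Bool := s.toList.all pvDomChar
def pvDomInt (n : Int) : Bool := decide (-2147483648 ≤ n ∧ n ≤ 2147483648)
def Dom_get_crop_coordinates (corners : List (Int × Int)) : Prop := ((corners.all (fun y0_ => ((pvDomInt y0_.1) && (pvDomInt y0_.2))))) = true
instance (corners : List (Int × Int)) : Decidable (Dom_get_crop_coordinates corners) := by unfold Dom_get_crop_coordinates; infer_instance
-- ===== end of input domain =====

-- B replaces A's set-based uniqueness by sort-then-adjacent-dedup over plain lists (alternative decomposition, same cost).

-- ===== PORT A =====
def get_crop_coordinates (corners : List (Int × Int)) : List Int × List Int :=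
  let st := corners.foldl
    (fun (st : PySem.Set Int × PySem.Set Int) vertex =>
      (PySem.Set.add st.1 vertex.1, PySem.Set.add st.2 vertex.2))
    (PySem.Set.empty, PySem.Set.empty)
  (PySem.List.sorted st.1 (fun a => a) false, PySem.List.sorted st.2 (fun a => a) false)

-- ===== PORT B =====
-- the single pass of _dedup_sorted: state = (out, prev); append v only when prev ≠ v
def pvDedStep (st : List Int × Option Int) (v : Int) : List Int × Option Int :=
  if st.2 = some v then st else (st.1 ++ [v], some v)

def pvDedupSorted (lst : List Int) : List Int :=
  (lst.foldl pvDedStep (([] : List Int), (none : Option Int))).1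

def get_crop_coordinates_alt (corners : List (Int × Int)) : List Int × List Int :=
  let ys := corners.foldl (fun acc vertex => acc ++ [vertex.1]) []
  let xs := corners.foldl (fun acc vertex => acc ++ [vertex.2]) []
  (pvDedupSorted (PySem.List.sorted ys (fun a => a) false),
   pvDedupSorted (PySem.List.sorted xs (fun a => a) false))

-- ===== PRECONDITION & SPEC =====
def Spec_get_crop_coordinates (corners : List (Int × Int)) (out : List Int × List Int) : Prop := out = get_crop_coordinates_alt corners
instance (corners : List (Int × Int)) (out : List Int × List Int) : Decidable (Spec_get_crop_coordinates corners out) := by unfold Spec_get_crop_coordinates; infer_instance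

-- ===== CLAIM (what is proved, stated in full; the proofs are below) =====
def Claim_equal_get_crop_coordinates : Prop := ∀ (corners : List (Int × Int)), Dom_get_crop_coordinates corners → Spec_get_crop_coordinates corners (get_crop_coordinates corners)

-- ===== LEMMAS AND PROOFS =====

-- A's simultaneous pair-of-sets fold splits into two independent folds over the projections
theorem pair_fold (corners : List (Int × Int)) (s t : PySem.Set Int) :
    corners.foldl
      (fun (st : PySem.Set Int × PySem.Set Int) vertex =>
        (PySem.Set.add st.1 vertex.1, PySem.Set.add st.2 vertex.2)) (s, t)
    = ((corners.map (·.1)).foldl PySem.Set.add s, (corners.map (·.2)).foldl PySem.Set.add t) := by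
  induction corners generalizing s t with
  | nil => rfl
  | cons v c ih => simp [List.foldl_cons, ih]

-- the dedup loop's invariant: for a ≤-sorted input it returns a <-sorted list with the same members
theorem ded_loop (m : List Int) : ∀ (out : List Int) (p : Option Int),
    m.Pairwise (· ≤ ·) →
    out.Pairwise (· < ·) →
    (p = none → out = []) →
    (∀ c, p = some c → c ∈ out ∧ (∀ a ∈ out, a ≤ c) ∧ (∀ b ∈ m, c ≤ b)) →
    (m.foldl pvDedStep (out, p)).1.Pairwise (· < ·) ∧
    (∀ z, z ∈ (m.foldl pvDedStep (out, p)).1 ↔ z ∈ out ∨ z ∈ m) := by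
  induction m with
  | nil => intro out p _ hout _ _; exact ⟨hout, fun z => by simp⟩
  | cons v t ih =>
    intro out p hm hout hnone hsome
    have hm' := (List.pairwise_cons.mp hm).2
    have hvle := (List.pairwise_cons.mp hm).1
    by_cases hp : p = some v
    · subst hp
      obtain ⟨hmem, hle, hfwd⟩ := hsome v rfl
      rw [List.foldl_cons, show pvDedStep (out, some v) v = (out, some v) from if_pos rfl]
      obtain ⟨h1, h2⟩ := ih out (some v) hm' hout (fun h => nomatch h)
        (fun c hc => by
          injection hc with h; subst h
          exact ⟨hmem, hle, fun b hb => hfwd b (List.mem_cons_of_mem _ hb)⟩)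
      refine ⟨h1, fun z => ?_⟩
      rw [h2 z]
      constructor
      · rintro (h | h)
        · exact Or.inl h
        · exact Or.inr (List.mem_cons_of_mem _ h)
      · rintro (h | h)
        · exact Or.inl h
        · rcases List.mem_cons.mp h with h | h
          · exact Or.inl (h ▸ hmem)
          · exact Or.inr h
    · -- append case
      have hltv : ∀ a ∈ out, a < v := by
        intro a ha
        cases p with
        | none => rw [hnone rfl] at ha; cases ha
        | some c =>
          obtain ⟨_, hle, hfwd⟩ := hsome c rfl
          have hcv : c ≤ v := hfwd v (List.mem_cons_self)
          have hcnv : c ≠ v := fun h => hp (by rw [h])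
          exact lt_of_le_of_lt (hle a ha) (lt_of_le_of_ne hcv hcnv)
      have hout' : (out ++ [v]).Pairwise (· < ·) := by
        rw [List.pairwise_append]
        exact ⟨hout, List.pairwise_singleton _ _, fun a ha b hb => by
          rw [List.mem_singleton] at hb; exact hb ▸ hltv a ha⟩
      rw [List.foldl_cons, show pvDedStep (out, p) v = (out ++ [v], some v) from if_neg hp]
      obtain ⟨h1, h2⟩ := ih (out ++ [v]) (some v) hm' hout' (fun h => nomatch h)
        (fun c hc => by
          injection hc with h; subst h
          refine ⟨List.mem_append_right _ (List.mem_cons_self), ?_, hvle⟩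
          intro a ha
          rcases List.mem_append.mp ha with h | h
          · exact le_of_lt (hltv a h)
          · rw [List.mem_singleton] at h; omega)
      refine ⟨h1, fun z => ?_⟩
      rw [h2 z]
      simp only [List.mem_append, List.mem_cons]
      tauto
-- a key fact: one sorted(set(l)) equals dedup(sorted(l))
theorem sorted_set_eq_dedup_sorted (l : List Int) :
    PySem.List.sorted (PySem.Set.ofList l) (fun a => a) false
      = pvDedupSorted (PySem.List.sorted l (fun a => a) false) := by
  have hsorted : (PySem.List.sorted l (fun a => a) false).Pairwise (· ≤ ·) :=
    PySem.List.sorted_pairwise l (fun a => a)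
  obtain ⟨hlt, hmem⟩ := ded_loop (PySem.List.sorted l (fun a => a) false) [] none hsorted
    (List.Pairwise.nil) (fun _ => rfl) (fun c hc => by cases hc)
  apply PySem.List.sorted_eq_of_perm_of_pairwise_lt
  · -- Perm: both nodup, same members
    have hnd1 : (pvDedupSorted (PySem.List.sorted l (fun a => a) false)).Nodup :=
      hlt.imp (fun h => ne_of_lt h)
    have hnd2 : (PySem.Set.ofList l).Nodup := PySem.Set.nodup_ofList l
    rw [List.perm_ext_iff_of_nodup hnd1 hnd2]
    intro z
    rw [show pvDedupSorted (PySem.List.sorted l (fun a => a) false)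
          = ((PySem.List.sorted l (fun a => a) false).foldl pvDedStep ([], none)).1 from rfl,
        hmem z]
    simp [PySem.List.mem_sorted, PySem.Set.mem_ofList]
  · exact hlt

-- ===== VERDICT (by name: the statement is the Claim_ definition above) =====
theorem get_crop_coordinates_spec : Claim_equal_get_crop_coordinates := by
  intro corners _
  unfold Spec_get_crop_coordinates get_crop_coordinates get_crop_coordinates_alt
  rw [pair_fold]
  simp only [PySem.List.foldl_append_singleton_eq_map]
  have h1 := sorted_set_eq_dedup_sorted (corners.map (·.1))
  have h2 := sorted_set_eq_dedup_sorted (corners.map (·.2))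
  rw [PySem.Set.ofList] at h1 h2
  simp_all [PySem.Set.empty]
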